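-- pv_equiv track=rewrite | github.com/vikaspathak0911/ai-agent-langgraph | src/tools.py | size_recommender
-- ===== SOURCE A (Python) =====
-- def size_recommender(user_input):
--     text = user_input.lower()
--
--     # Defaults
--     height = "average"
--     weight = "average"
--     fit = "regular"
--
--     # Detect height
--     if any(word in text for word in ["tall", "high", "long"]):
--         height = "tall"
--     elif any(word in text for word in ["short", "small"]):
--         height = "short"
--
--     # Detect build/weight
--     if any(word in text for word in ["slim", "thin", "light"]):
--         weight = "slim"
--     elif any(word in text for word in ["medium", "average", "normal"]):
--         weight = "medium"
--     elif any(word in text for word in ["heavy", "large", "big"]):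
--         weight = "large"
--
--     # Detect fit preference
--     if "loose" in text:
--         fit = "loose"
--     elif "tight" in text or "slim fit" in text:
--         fit = "tight"
--
--     # Size decision rules
--     if weight == "slim":
--         size = "S" if fit != "loose" else "M"
--     elif weight == "medium":
--         size = "M" if fit != "loose" else "L"
--     else:  # large/heavy
--         size = "L" if fit != "loose" else "XL"
--
--     # Adjust for height
--     if height == "tall" and size != "XL":
--         size += "-Tall"
--
--     return f"Based on your input, we recommend size {size} ({fit} fit)."
-- ===== SOURCE B (Python) =====
-- # Single left-to-right window scan: instead of running one substring search per
-- # keyword, slide over the text once and look each window up in a keyword->category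
-- # table, collecting the set of matched categories; the size is then computed by
-- # ladder arithmetic from that set.
-- KW = {
--     "tall": 0, "high": 0, "long": 0,
--     "slim": 2, "thin": 2, "light": 2,
--     "medium": 3, "average": 3, "normal": 3,
--     "heavy": 4, "large": 4, "big": 4,
--     "loose": 5, "tight": 6, "slim fit": 6,
-- }
-- LENS = (3, 4, 5, 6, 7, 8)
--
-- def size_recommender(user_input):
--     text = user_input.lower()
--     found = set()
--     for i in range(len(text)):
--         for L in LENS:
--             c = KW.get(text[i:i + L])
--             if c is not None:
--                 found.add(c)
--     loose = 5 in found
--     fit = "loose" if loose else ("tight" if 6 in found else "regular")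
--     base = 0 if 2 in found else (1 if 3 in found else 2)
--     idx = base + loose
--     size = ["S", "M", "L", "XL"][idx]
--     if 0 in found and idx != 3:
--         size += "-Tall"
--     return f"Based on your input, we recommend size {size} ({fit} fit)."
-- ===== Notes on version B (the rewrite author's own statement) =====
-- stated objective: alternative
-- what changed: Instead of running one substring search per keyword (13 'in' scans over the text) and if/elif label chains, B slides a window over the text once, looks each window up in a keyword-to-category dict, collects the set of matched categories, and computes the size by ladder arithmetic (base index from the build category, +1 for loose, indexed into ["S","M","L","XL"]).
import Mathlib
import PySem

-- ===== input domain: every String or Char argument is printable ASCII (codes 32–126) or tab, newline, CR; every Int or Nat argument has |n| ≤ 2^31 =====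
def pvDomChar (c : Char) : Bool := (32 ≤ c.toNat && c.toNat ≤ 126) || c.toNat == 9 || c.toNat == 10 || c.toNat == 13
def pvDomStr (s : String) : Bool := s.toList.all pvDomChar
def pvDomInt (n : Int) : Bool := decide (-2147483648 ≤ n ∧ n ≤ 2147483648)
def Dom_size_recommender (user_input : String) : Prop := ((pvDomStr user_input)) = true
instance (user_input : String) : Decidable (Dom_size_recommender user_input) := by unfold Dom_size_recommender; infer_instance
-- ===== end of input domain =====

-- B replaces A's one-substring-search-per-keyword chains by a single left-to-right
-- window scan over the text with a keyword→category table, then ladder arithmetic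
-- on the matched-category set; objective: alternative (same result, different algorithm).

-- ===== PORT A =====
def size_recommender (user_input : String) : String :=
  let text := PySem.Str.lower user_input
  let height : String :=
    if (["tall", "high", "long"]).any (fun w => PySem.Str.isIn w text) then "tall"
    else if (["short", "small"]).any (fun w => PySem.Str.isIn w text) then "short"
    else "average"
  let weight : String :=
    if (["slim", "thin", "light"]).any (fun w => PySem.Str.isIn w text) then "slim"
    else if (["medium", "average", "normal"]).any (fun w => PySem.Str.isIn w text) then "medium"
    else if (["heavy", "large", "big"]).any (fun w => PySem.Str.isIn w text) then "large"
    else "average"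
  let fit : String :=
    if PySem.Str.isIn "loose" text then "loose"
    else if PySem.Str.isIn "tight" text || PySem.Str.isIn "slim fit" text then "tight"
    else "regular"
  let size : String :=
    if weight = "slim" then (if fit ≠ "loose" then "S" else "M")
    else if weight = "medium" then (if fit ≠ "loose" then "M" else "L")
    else (if fit ≠ "loose" then "L" else "XL")
  let size : String :=
    if height = "tall" ∧ size ≠ "XL" then size ++ "-Tall" else size
  "Based on your input, we recommend size " ++ size ++ " (" ++ fit ++ " fit)."

-- ===== PORT B =====
-- Source B's module constant KW: keyword → category (0 tall, 2 slim, 3 medium, 4 large, 5 loose, 6 tight)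
def pvKW : PySem.Dict String Int := PySem.Dict.ofList
  [("tall", 0), ("high", 0), ("long", 0),
   ("slim", 2), ("thin", 2), ("light", 2),
   ("medium", 3), ("average", 3), ("normal", 3),
   ("heavy", 4), ("large", 4), ("big", 4),
   ("loose", 5), ("tight", 6), ("slim fit", 6)]

-- Source B's module constant LENS: the keyword lengths, i.e. the window widths tried
def pvLens : List Int := [3, 4, 5, 6, 7, 8]

def size_recommender_alt (user_input : String) : String :=
  let text := PySem.Str.lower user_input
  let found : PySem.Set Int :=
    (PySem.List.pyRange 0 (PySem.Str.len text) 1).foldl (fun s i =>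
      pvLens.foldl (fun s L =>
        match pvKW.get? (PySem.Str.slice text (some i) (some (i + L))) with
        | some c => PySem.Set.add s c
        | none => s) s) PySem.Set.empty
  let loose := PySem.Set.contains found 5
  let fit : String :=
    if loose then "loose" else if PySem.Set.contains found 6 then "tight" else "regular"
  let base : Int :=
    if PySem.Set.contains found 2 then 0 else if PySem.Set.contains found 3 then 1 else 2
  let idx : Int := base + (if loose then 1 else 0)
  let size := (PySem.List.pyGet? ["S", "M", "L", "XL"] idx).getD ""
  let size := if PySem.Set.contains found 0 ∧ idx ≠ 3 then size ++ "-Tall" else size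
  "Based on your input, we recommend size " ++ size ++ " (" ++ fit ++ " fit)."

-- ===== PRECONDITION & SPEC =====
def Spec_size_recommender (user_input : String) (out : String) : Prop := out = size_recommender_alt user_input
instance (user_input : String) (out : String) : Decidable (Spec_size_recommender user_input out) := by unfold Spec_size_recommender; infer_instance

-- ===== CLAIM (what is proved, stated in full; the proofs are below) =====
def Claim_equal_size_recommender : Prop := ∀ (user_input : String), Dom_size_recommender user_input → Spec_size_recommender user_input (size_recommender user_input)

-- ===== LEMMAS AND PROOFS =====

-- B's scan loop, named so the lemmas can speak about it (definitionally the `found` of the port).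
def pvFound (text : String) : PySem.Set Int :=
  (PySem.List.pyRange 0 (PySem.Str.len text) 1).foldl (fun s i =>
    pvLens.foldl (fun s L =>
      match pvKW.get? (PySem.Str.slice text (some i) (some (i + L))) with
      | some c => PySem.Set.add s c
      | none => s) s) PySem.Set.empty

-- membership through the inner (window-width) loop
theorem pv_mem_inner (text : String) (i : Int) (Ls : List Int) (s : PySem.Set Int) (k : Int) :
    (k ∈ Ls.foldl (fun s L =>
        match pvKW.get? (PySem.Str.slice text (some i) (some (i + L))) with
        | some c => PySem.Set.add s c
        | none => s) s)
    ↔ k ∈ s ∨ ∃ L ∈ Ls, pvKW.get? (PySem.Str.slice text (some i) (some (i + L))) = some k := by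
  induction Ls generalizing s with
  | nil => simp
  | cons L Ls ih =>
    simp only [List.foldl_cons, ih]
    cases h : pvKW.get? (PySem.Str.slice text (some i) (some (i + L))) with
    | none => simp [h]
    | some c => simp only [PySem.Set.mem_add, List.mem_cons]
                constructor
                · rintro (((hs | rfl) | ⟨L', hL', hg⟩))
                  · exact Or.inl hs
                  · exact Or.inr ⟨L, Or.inl rfl, h⟩
                  · exact Or.inr ⟨L', Or.inr hL', hg⟩
                · rintro (hs | ⟨L', (rfl | hL'), hg⟩)
                  · exact Or.inl (Or.inl hs)
                  · exact Or.inl (Or.inr (by rw [h] at hg; exact (Option.some_inj.mp hg).symm))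
                  · exact Or.inr ⟨L', hL', hg⟩

-- membership through the outer (position) loop
theorem pv_mem_outer (text : String) (xs : List Int) (s : PySem.Set Int) (k : Int) :
    (k ∈ xs.foldl (fun s i =>
        pvLens.foldl (fun s L =>
          match pvKW.get? (PySem.Str.slice text (some i) (some (i + L))) with
          | some c => PySem.Set.add s c
          | none => s) s) s)
    ↔ k ∈ s ∨ ∃ i ∈ xs, ∃ L ∈ pvLens,
        pvKW.get? (PySem.Str.slice text (some i) (some (i + L))) = some k := by
  induction xs generalizing s with
  | nil => simp
  | cons i xs ih =>
    simp only [List.foldl_cons, ih, pv_mem_inner, List.mem_cons]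
    constructor
    · rintro ((hs | ⟨L, hL, hg⟩) | ⟨i', hi', rest⟩)
      · exact Or.inl hs
      · exact Or.inr ⟨i, Or.inl rfl, L, hL, hg⟩
      · exact Or.inr ⟨i', Or.inr hi', rest⟩
    · rintro (hs | ⟨i', (rfl | hi'), rest⟩)
      · exact Or.inl (Or.inl hs)
      · exact Or.inl (Or.inr rest)
      · exact Or.inr ⟨i', hi', rest⟩

theorem pv_mem_found (text : String) (k : Int) :
    k ∈ pvFound text ↔ ∃ i : Int, (0 ≤ i ∧ i < PySem.Str.len text) ∧ ∃ L ∈ pvLens,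
      pvKW.get? (PySem.Str.slice text (some i) (some (i + L))) = some k := by
  unfold pvFound
  rw [pv_mem_outer]
  simp [PySem.Set.empty, PySem.List.mem_pyRange_one]

-- the literal pairs of pvKW
def pvPairs : List (String × Int) :=
  [("tall", 0), ("high", 0), ("long", 0),
   ("slim", 2), ("thin", 2), ("light", 2),
   ("medium", 3), ("average", 3), ("normal", 3),
   ("heavy", 4), ("large", 4), ("big", 4),
   ("loose", 5), ("tight", 6), ("slim fit", 6)]

theorem pv_get_iff (sub : String) (k : Int) :
    pvKW.get? sub = some k ↔ (sub, k) ∈ pvPairs := by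
  have hitems : pvKW.items = pvPairs := by decide
  have hnd : pvKW.keys.Nodup := by decide
  rw [PySem.Dict.get?_eq_some_iff_mem_items pvKW sub k hnd, hitems]

-- a window hitting a keyword w somewhere ↔ w is a substring of the text
theorem pv_window_iff (text w : String) (hw : w.toList ≠ [])
    (hL : ((w.toList.length : Int)) ∈ pvLens) :
    (∃ i : Int, (0 ≤ i ∧ i < PySem.Str.len text) ∧ ∃ L ∈ pvLens,
        PySem.Str.slice text (some i) (some (i + L)) = w)
    ↔ PySem.Str.isIn w text = true := by
  rw [PySem.Str.isIn_eq, ← PySem.Chars.exists_prefix_drop_iff_isIn]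
  constructor
  · rintro ⟨i, ⟨hi0, _⟩, L, hLmem, hslice⟩
    have hLpos : 0 ≤ L := by
      simp only [pvLens, List.mem_cons, List.not_mem_nil, or_false] at hLmem
      rcases hLmem with rfl | rfl | rfl | rfl | rfl | rfl <;> norm_num
    have := congrArg String.toList hslice
    rw [PySem.Str.toList_slice, PySem.Chars.slice_eq_listSlice,
        PySem.List.slice_toNat _ hi0 (by omega)] at this
    exact ⟨i.toNat, this ▸ List.take_prefix _ _⟩
  · rintro ⟨j, hpre⟩
    have hjlt : j < text.toList.length := by
      by_contra hge
      rw [List.drop_eq_nil_of_le (by omega)] at hpre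
      exact hw (List.prefix_nil.mp hpre)
    refine ⟨(j : Int), ⟨Int.natCast_nonneg j, by rw [PySem.Str.len_eq]; exact_mod_cast hjlt⟩,
      (w.toList.length : Int), hL, ?_⟩
    apply String.toList_inj.mp
    rw [PySem.Str.toList_slice, PySem.Chars.slice_eq_listSlice,
        PySem.List.slice_natCast_add]
    exact (List.prefix_iff_eq_take.mp hpre).symm
  -- (the first hypothesis bound i < len is unused in →; kept to mirror the loop's range)

-- per-category characterisation of the scan's result: category c was collected
-- iff one of its keywords occurs in the text
theorem pv_cat (text : String) (c : Int) (ws : List String)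
    (hchar : ∀ sub : String, (sub, c) ∈ pvPairs ↔ sub ∈ ws)
    (hws : ∀ w ∈ ws, w.toList ≠ [] ∧ ((w.toList.length : Int)) ∈ pvLens) :
    PySem.Set.contains (pvFound text) c = ws.any (fun w => PySem.Str.isIn w text) := by
  rw [Bool.eq_iff_iff, PySem.Set.contains_iff, pv_mem_found, List.any_eq_true]
  simp only [pv_get_iff]
  constructor
  · rintro ⟨i, hi, L, hL, hmem⟩
    have hsub := (hchar _).mp hmem
    obtain ⟨hne, hlen⟩ := hws _ hsub
    exact ⟨_, hsub, (pv_window_iff text _ hne hlen).mp ⟨i, hi, L, hL, rfl⟩⟩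
  · rintro ⟨w, hwmem, hin⟩
    obtain ⟨hne, hlen⟩ := hws _ hwmem
    obtain ⟨i, hi, L, hL, hs⟩ := (pv_window_iff text w hne hlen).mpr hin
    exact ⟨i, hi, L, hL, hs ▸ (hchar w).mpr hwmem⟩

theorem pv_cat0 (text : String) :
    PySem.Set.contains (pvFound text) 0
      = (["tall", "high", "long"]).any (fun w => PySem.Str.isIn w text) := by
  apply pv_cat
  · intro sub; simp [pvPairs]
  · decide

theorem pv_cat2 (text : String) :
    PySem.Set.contains (pvFound text) 2
      = (["slim", "thin", "light"]).any (fun w => PySem.Str.isIn w text) := by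
  apply pv_cat
  · intro sub; simp [pvPairs]
  · decide

theorem pv_cat3 (text : String) :
    PySem.Set.contains (pvFound text) 3
      = (["medium", "average", "normal"]).any (fun w => PySem.Str.isIn w text) := by
  apply pv_cat
  · intro sub; simp [pvPairs]
  · decide

theorem pv_cat5 (text : String) :
    PySem.Set.contains (pvFound text) 5
      = (["loose"]).any (fun w => PySem.Str.isIn w text) := by
  apply pv_cat
  · intro sub; simp [pvPairs]
  · decide

theorem pv_cat6 (text : String) :
    PySem.Set.contains (pvFound text) 6
      = (["tight", "slim fit"]).any (fun w => PySem.Str.isIn w text) := by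
  apply pv_cat
  · intro sub; simp [pvPairs]
  · decide

-- ===== VERDICT (by name: the statement is the Claim_ definition above) =====
theorem size_recommender_spec : Claim_equal_size_recommender := by
  intro u _
  show size_recommender u = size_recommender_alt u
  have halt : size_recommender_alt u =
      (let text := PySem.Str.lower u
       let loose := PySem.Set.contains (pvFound text) 5
       let fit : String :=
         if loose then "loose" else if PySem.Set.contains (pvFound text) 6 then "tight" else "regular"
       let base : Int :=
         if PySem.Set.contains (pvFound text) 2 then 0
         else if PySem.Set.contains (pvFound text) 3 then 1 else 2
       let idx : Int := base + (if loose then 1 else 0)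
       let size := (PySem.List.pyGet? ["S", "M", "L", "XL"] idx).getD ""
       let size := if PySem.Set.contains (pvFound text) 0 ∧ idx ≠ 3 then size ++ "-Tall" else size
       "Based on your input, we recommend size " ++ size ++ " (" ++ fit ++ " fit).") := rfl
  rw [halt]; clear halt
  simp only [size_recommender, pv_cat0, pv_cat2, pv_cat3, pv_cat5, pv_cat6,
             List.any_cons, List.any_nil, Bool.or_false]
  generalize (PySem.Str.isIn "tall" (PySem.Str.lower u)
      || (PySem.Str.isIn "high" (PySem.Str.lower u) || PySem.Str.isIn "long" (PySem.Str.lower u))) = b1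
  generalize (PySem.Str.isIn "short" (PySem.Str.lower u)
      || PySem.Str.isIn "small" (PySem.Str.lower u)) = b2
  generalize (PySem.Str.isIn "slim" (PySem.Str.lower u)
      || (PySem.Str.isIn "thin" (PySem.Str.lower u) || PySem.Str.isIn "light" (PySem.Str.lower u))) = b3
  generalize (PySem.Str.isIn "medium" (PySem.Str.lower u)
      || (PySem.Str.isIn "average" (PySem.Str.lower u) || PySem.Str.isIn "normal" (PySem.Str.lower u))) = b4
  generalize (PySem.Str.isIn "heavy" (PySem.Str.lower u)
      || (PySem.Str.isIn "large" (PySem.Str.lower u) || PySem.Str.isIn "big" (PySem.Str.lower u))) = b5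
  generalize PySem.Str.isIn "loose" (PySem.Str.lower u) = b6
  generalize PySem.Str.isIn "tight" (PySem.Str.lower u) = b7
  generalize PySem.Str.isIn "slim fit" (PySem.Str.lower u) = b8
  revert b1 b2 b3 b4 b5 b6 b7 b8
  decide
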